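-- pv_equiv track=rewrite | github.com/niklassiemer/applicationprofiles | MetaDataFiles/TurtleSchemeGenerator/gen_all_terms.py | remove_duplications
-- ===== SOURCE A (Python) =====
-- def remove_duplications(term_list):
--     sfb_terms_ids = [item.split()[0] for item in term_list]
--
--     unique_term_ids = []
--     duplicated_idx = {}
--     failure = False
--     msg = ""
--
--     for n, ID in enumerate(sfb_terms_ids):
--         if ID not in unique_term_ids:
--             unique_term_ids.append(ID)
--             if n+1 < len(sfb_terms_ids):
--                 duplication_idxs = []
--                 for n2, ID2 in enumerate(sfb_terms_ids[n+1:]):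
--                     if ID == ID2:
--                         duplication_idxs.append(n+n2+1)
--                 if len(duplication_idxs) > 0:
--                     duplicated_idx[ID] = [n] + duplication_idxs
--
--     for key, value in duplicated_idx.items():
--         different_output = [term_list[value[0]]]
--         for indx in value[1:]:
--             if term_list[value[0]] != term_list[indx] and term_list[indx] not in different_output:
--                 different_output.append(term_list[indx])
--         if len(different_output) > 1:
--             failure = True
--             msg += f'Not matching entries for {key}! \n'
--             for output in different_output:
--                 msg += "-----  \n "
--                 msg += output + "\n "
--
--     if failure:
--         raise ValueError("Not matching Entries found: \n" + msg)
--
--     return list(set(term_list))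
-- ===== SOURCE B (Python) =====
-- def remove_duplications(term_list):
--     # One pass: remember the first entry seen for each term id; any later entry
--     # with the same id must be identical, otherwise the terms conflict.
--     first_entry = {}
--     for item in term_list:
--         term_id = item.split()[0]
--         first = first_entry.setdefault(term_id, item)
--         if item != first:
--             raise ValueError(
--                 "Not matching Entries found: \n"
--                 + f"Not matching entries for {term_id}! \n"
--             )
--     return list(set(term_list))
-- ===== Notes on version B (the rewrite author's own statement) =====
-- stated objective: faster
-- what changed: Replaces A's per-new-id rescan of the whole tail (plus linear membership tests) by a single pass that keeps a dict from term id to its first entry and checks each later entry against it.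
import Mathlib
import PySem

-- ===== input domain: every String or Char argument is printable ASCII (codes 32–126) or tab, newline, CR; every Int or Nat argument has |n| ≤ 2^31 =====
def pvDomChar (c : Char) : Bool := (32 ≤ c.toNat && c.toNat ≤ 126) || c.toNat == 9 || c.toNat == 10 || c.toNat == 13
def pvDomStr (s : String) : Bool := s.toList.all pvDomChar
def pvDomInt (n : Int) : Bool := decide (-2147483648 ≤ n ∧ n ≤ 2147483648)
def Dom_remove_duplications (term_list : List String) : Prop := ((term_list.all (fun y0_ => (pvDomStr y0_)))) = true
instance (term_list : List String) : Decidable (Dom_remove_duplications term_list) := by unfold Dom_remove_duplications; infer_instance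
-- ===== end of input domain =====

-- B replaces A's quadratic duplicate-index hunt by a single pass over the list with a
-- dict mapping each term id to its first entry (objective: faster). Both return list(set(term_list)).

-- item.split()[0]: exact whenever item.split() is nonempty (guaranteed by Pre_)
def pyTermId (item : String) : String := (PySem.Str.split₀ item).headD ""

-- ===== PORT A =====
def remove_duplications (term_list : List String) : List String :=
  let sfb_terms_ids := term_list.map pyTermId
  -- first loop: build unique_term_ids and duplicated_idx
  let st := (PySem.List.enumerate sfb_terms_ids).foldl
    (fun (st : List String × PySem.Dict String (List Int)) p =>
      let n := p.1
      let ID := p.2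
      if ID ∈ st.1 then st
      else
        let uniq := st.1 ++ [ID]
        if n + 1 < PySem.List.len sfb_terms_ids then
          let duplication_idxs := (PySem.List.enumerate
              (PySem.List.slice sfb_terms_ids (some (n + 1)) none)).foldl
            (fun acc q => if ID = q.2 then acc ++ [n + q.1 + 1] else acc) []
          if duplication_idxs.length > 0 then (uniq, st.2.insert ID (n :: duplication_idxs))
          else (uniq, st.2)
        else (uniq, st.2))
    ([], PySem.Dict.empty)
  -- second loop: the failure flag (msg only feeds the ValueError, which Pre_ excludes)
  let failure := st.2.items.foldl
    (fun failure kv =>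
      let v0 := PySem.List.pyGetD term_list (kv.2.headD 0) ""  -- indices in the dict are in range by construction
      let different_output := (kv.2.drop 1).foldl
        (fun acc indx =>
          let t := PySem.List.pyGetD term_list indx ""
          if v0 ≠ t ∧ t ∉ acc then acc ++ [t] else acc) [v0]
      if different_output.length > 1 then true else failure) false
  -- on failure Python raises ValueError: those inputs are outside Pre_
  if failure then [] else PySem.Set.ofList term_list

-- ===== PORT B =====
def remove_duplications_alt (term_list : List String) : List String :=
  let st := term_list.foldl
    (fun (st : PySem.Dict String String × Bool) item =>
      let tid := pyTermId item
      match st.1.get? tid with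
      | none => (st.1.insert tid item, st.2)
      | some first => (st.1, st.2 || item ≠ first))
    (PySem.Dict.empty, false)
  -- st.2 = true is Python B's ValueError: those inputs are outside Pre_
  if st.2 then [] else PySem.Set.ofList term_list

-- ===== PRECONDITION & SPEC =====
-- Pre_ excludes exactly the inputs on which A raises: an item that is empty/whitespace-only
-- (item.split()[0] → IndexError) or two entries sharing a term id but differing as strings
-- (A's ValueError "Not matching Entries found").
def Pre_remove_duplications (term_list : List String) : Prop :=
  (∀ s ∈ term_list, PySem.Str.split₀ s ≠ []) ∧
  (∀ a ∈ term_list, ∀ b ∈ term_list, pyTermId a = pyTermId b → a = b)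
instance (term_list : List String) : Decidable (Pre_remove_duplications term_list) := by
  unfold Pre_remove_duplications; infer_instance
def pvWitness_remove_duplications : List String := ["a0 label", "b1 other", "a0 label"]

def Spec_remove_duplications (term_list : List String) (out : List String) : Prop := out = remove_duplications_alt term_list
instance (term_list : List String) (out : List String) : Decidable (Spec_remove_duplications term_list out) := by unfold Spec_remove_duplications; infer_instance

-- ===== CLAIM (what is proved, stated in full; the proofs are below) =====
def Claim_equal_remove_duplications : Prop := ∀ (term_list : List String), Dom_remove_duplications term_list → Pre_remove_duplications term_list → Spec_remove_duplications term_list (remove_duplications term_list)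

-- ===== LEMMAS AND PROOFS =====

-- a fold whose step never changes the accumulator
theorem foldl_id_of_mem {α β : Type} {l : List α} {f : β → α → β} {i : β}
    (h : ∀ b, ∀ x ∈ l, f b x = b) : l.foldl f i = i := by
  induction l generalizing i with
  | nil => rfl
  | cons x xs ih => simp only [List.foldl_cons, h _ x (by simp)]
                    exact ih (fun b y hy => h b y (by simp [hy]))

-- the property every (key, idxs) pair in A's duplicated_idx dict satisfies:
-- every stored index is a valid Nat index whose entry has term id = key
def GoodVal (term_list : List String) (key : String) (v : List Int) : Prop :=
  ∀ m ∈ v, ∃ k : Nat, m = (k : Int) ∧ k < term_list.length ∧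
    ∃ h : k < term_list.length, pyTermId term_list[k] = key

theorem goodVal_dups (term_list : List String) (k : Nat) (hk : k < term_list.length) :
    ∀ m ∈ (PySem.List.enumerate
        (PySem.List.slice (term_list.map pyTermId) (some ((k : Int) + 1)) none)).foldl
      (fun acc q => if pyTermId term_list[k] = q.2 then acc ++ [(k : Int) + q.1 + 1] else acc) [],
      ∃ k2 : Nat, m = (k2 : Int) ∧ k2 < term_list.length ∧
        ∃ h : k2 < term_list.length, pyTermId term_list[k2] = pyTermId term_list[k] := by
  apply List.foldlRecOn (motive := fun acc => ∀ m ∈ acc, ∃ k2 : Nat, m = (k2 : Int) ∧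
    k2 < term_list.length ∧ ∃ h : k2 < term_list.length, pyTermId term_list[k2] = pyTermId term_list[k])
  · simp
  · intro acc hacc q hq m hm
    split at hm
    · rename_i heq
      rcases List.mem_append.mp hm with hm' | hm'
      · exact hacc m hm'
      · simp only [List.mem_singleton] at hm'
        have : ((k : Int) + 1) = ((k + 1 : Nat) : Int) := by push_cast; ring
        rw [this, PySem.List.slice_from_natCast] at hq
        rcases (PySem.List.mem_enumerate_iff _ _ _).mp hq with ⟨k2, hk2, hq2⟩
        refine ⟨k + 1 + k2, ?_, ?_, ?_⟩
        · subst hm'; rw [hq2]; push_cast; ring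
        · have := hk2; simp [List.length_drop] at this
          omega
        · have hlt : k + 1 + k2 < (term_list.map pyTermId).length := by
            have := hk2; simp [List.length_drop] at this ⊢; omega
          have hlt' : k + 1 + k2 < term_list.length := by simpa using hlt
          refine ⟨hlt', ?_⟩
          have : (List.drop (k + 1) (term_list.map pyTermId))[k2] =
              (term_list.map pyTermId)[k + 1 + k2] := by
            rw [List.getElem_drop]
          rw [hq2] at heq
          simp only [this, List.getElem_map] at heq
          exact heq.symm
    · exact hacc m hm

-- invariant of A's first loop: every pair of the dict is Good
theorem firstLoop_good (term_list : List String) :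
    ∀ p ∈ ((PySem.List.enumerate (term_list.map pyTermId)).foldl
      (fun (st : List String × PySem.Dict String (List Int)) p =>
        let n := p.1
        let ID := p.2
        if ID ∈ st.1 then st
        else
          let uniq := st.1 ++ [ID]
          if n + 1 < PySem.List.len (term_list.map pyTermId) then
            let duplication_idxs := (PySem.List.enumerate
                (PySem.List.slice (term_list.map pyTermId) (some (n + 1)) none)).foldl
              (fun acc q => if ID = q.2 then acc ++ [n + q.1 + 1] else acc) []
            if duplication_idxs.length > 0 then (uniq, st.2.insert ID (n :: duplication_idxs))
            else (uniq, st.2)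
          else (uniq, st.2)
        ) ([], PySem.Dict.empty)).2.items,
      GoodVal term_list p.1 p.2 := by
  apply List.foldlRecOn (motive := fun (st : List String × PySem.Dict String (List Int)) => ∀ p ∈ st.2.items, GoodVal term_list p.1 p.2)
  · intro p hp; simp [PySem.Dict.empty] at hp
  · intro st hst p hp q hq
    rcases (PySem.List.mem_enumerate_iff _ _ _).mp hp with ⟨k, hk, hpk⟩
    have hk' : k < term_list.length := by simpa using hk
    simp only [hpk, zero_add] at hq ⊢
    split at hq
    · exact hst q hq
    · split at hq
      · split at hq
        · rcases (PySem.Dict.mem_items_insert _ _ _ _).mp hq with hq' | hq'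
          · subst hq'
            intro m hm
            have hgm : (term_list.map pyTermId)[k] = pyTermId term_list[k] := by
              simp
            rcases List.mem_cons.mp hm with hm' | hm'
            · exact ⟨k, hm', hk', hk', by rw [hgm]⟩
            · have := goodVal_dups term_list k hk' m (by rw [hgm] at hm'; exact hm')
              rcases this with ⟨k2, h1, h2, h3, h4⟩
              exact ⟨k2, h1, h2, h3, by rw [h4, hgm]⟩
          · exact hst q hq'.1
        · exact hst q hq
      · exact hst q hq

-- under Pre_, A's failure flag is false
theorem failure_false (term_list : List String)
    (hu : ∀ a ∈ term_list, ∀ b ∈ term_list, pyTermId a = pyTermId b → a = b)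
    (d : PySem.Dict String (List Int))
    (hd : ∀ p ∈ d.items, GoodVal term_list p.1 p.2) :
    d.items.foldl
      (fun failure kv =>
        let v0 := PySem.List.pyGetD term_list (kv.2.headD 0) ""
        let different_output := (kv.2.drop 1).foldl
          (fun acc indx =>
            let t := PySem.List.pyGetD term_list indx ""
            if v0 ≠ t ∧ t ∉ acc then acc ++ [t] else acc) [v0]
        if different_output.length > 1 then true else failure) false = false := by
  apply List.foldlRecOn (motive := fun b => b = false)
  · rfl
  · intro b hb kv hkv
    have hg := hd kv hkv
    simp only
    -- all entries indexed by kv.2 equal the one at its head, so different_output = [v0]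
    have hsame : ∀ m ∈ kv.2, PySem.List.pyGetD term_list m "" =
        PySem.List.pyGetD term_list (kv.2.headD 0) "" := by
      intro m hm
      have hne : kv.2 ≠ [] := List.ne_nil_of_mem hm
      have hhead : kv.2.headD 0 ∈ kv.2 := by
        cases h : kv.2 with
        | nil => exact absurd h hne
        | cons a t => simp
      rcases hg m hm with ⟨k, hmk, hk, hk2, hid⟩
      rcases hg _ hhead with ⟨k0, hm0k, hk0, hk02, hid0⟩
      rw [hmk, PySem.List.pyGetD_natCast, List.getD_eq_getElem _ _ hk,
          hm0k, PySem.List.pyGetD_natCast, List.getD_eq_getElem _ _ hk0]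
      exact hu _ (List.getElem_mem _) _ (List.getElem_mem _) (by rw [hid, hid0])
    have hfold : (kv.2.drop 1).foldl
        (fun acc indx =>
          let t := PySem.List.pyGetD term_list indx ""
          if PySem.List.pyGetD term_list (kv.2.headD 0) "" ≠ t ∧ t ∉ acc then acc ++ [t] else acc)
        [PySem.List.pyGetD term_list (kv.2.headD 0) ""] =
        [PySem.List.pyGetD term_list (kv.2.headD 0) ""] := by
      apply foldl_id_of_mem
      intro acc x hx
      have : PySem.List.pyGetD term_list x "" = PySem.List.pyGetD term_list (kv.2.headD 0) "" :=
        hsame x (List.mem_of_mem_drop hx)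
      simp [this]
    rw [hfold]
    simpa using hb

-- invariant of B's loop: the dict maps each id to an entry of term_list with that id,
-- and under Pre_ the conflict flag stays false
theorem altLoop_ok (term_list : List String)
    (hu : ∀ a ∈ term_list, ∀ b ∈ term_list, pyTermId a = pyTermId b → a = b)
    {l : List String} (hl : ∀ x ∈ l, x ∈ term_list)
    {d : PySem.Dict String String}
    (hd : ∀ p ∈ d.items, p.2 ∈ term_list ∧ pyTermId p.2 = p.1) :
    (l.foldl
      (fun (st : PySem.Dict String String × Bool) item =>
        let tid := pyTermId item
        match st.1.get? tid with
        | none => (st.1.insert tid item, st.2)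
        | some first => (st.1, st.2 || item ≠ first))
      (d, false)).2 = false := by
  induction l generalizing d with
  | nil => rfl
  | cons x xs ih =>
    simp only [List.foldl_cons]
    cases hget : d.get? (pyTermId x) with
    | none =>
      apply ih (fun y hy => hl y (by simp [hy]))
      intro p hp
      rcases (PySem.Dict.mem_items_insert _ _ _ _).mp hp with hp' | hp'
      · subst hp'; exact ⟨hl x (by simp), rfl⟩
      · exact hd p hp'.1
    | some first =>
      have hmem := PySem.Dict.mem_items_of_get?_eq_some d hget
      have hfe := hd _ hmem
      have : x = first := hu x (hl x (by simp)) first hfe.1 (by rw [hfe.2])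
      simp only [this, ne_eq, not_true_eq_false, decide_false, Bool.or_false]
      exact ih (fun y hy => hl y (by simp [hy])) hd

-- ===== VERDICT (by name: the statement is the Claim_ definition above) =====
theorem remove_duplications_spec : Claim_equal_remove_duplications := by
  intro term_list _ hpre
  rcases hpre with ⟨hsplit, hu⟩
  unfold Spec_remove_duplications remove_duplications remove_duplications_alt
  simp only
  rw [failure_false term_list hu _ (firstLoop_good term_list)]
  rw [altLoop_ok term_list hu (fun x hx => hx) (by intro p hp; simp [PySem.Dict.empty] at hp)]
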